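-- pv_equiv track=rewrite | github.com/1-pluto1/algorithm | leetcode2107/leetcode2107.py | shareCandies
-- ===== SOURCE A (Python) =====
-- from typing import List
--
-- from collections import Counter
--
-- def shareCandies(candies: List[int], k: int) -> int:
--     ans = 0
--     cnt = Counter(candies[k:])
--     ans = max(ans, len(cnt))
--     for i in range(k, len(candies)):
--         cnt[candies[i - k]] += 1
--         cnt[candies[i]] -= 1
--         if cnt[candies[i]] == 0:
--             cnt.pop(candies[i])
--         ans = max(ans, len(cnt))
--     return ans
-- ===== SOURCE B (Python) =====
-- from typing import List
-- from collections import Counter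
--
-- def shareCandies(candies: List[int], k: int) -> int:
--     total = Counter(candies)
--     distinct = len(total)
--     window = Counter(candies[:k])
--     enclosed = sum(1 for c, v in window.items() if v == total[c])
--     ans = distinct - enclosed
--     for i in range(k, len(candies)):
--         out = candies[i - k]
--         if window[out] == total[out]:
--             enclosed -= 1
--         window[out] -= 1
--         window[candies[i]] += 1
--         if window[candies[i]] == total[candies[i]]:
--             enclosed += 1
--         ans = max(ans, distinct - enclosed)
--     return ans
-- ===== Notes on version B (the rewrite author's own statement) =====
-- stated objective: alternative
-- what changed: A maintains a Counter of the candies outside the window (re-reading its length each step); B keeps a global Counter plus a sliding window Counter and an integer 'enclosed' of candy types fully inside the window, answering distinct_total - enclosed at each position.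
import Mathlib
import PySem

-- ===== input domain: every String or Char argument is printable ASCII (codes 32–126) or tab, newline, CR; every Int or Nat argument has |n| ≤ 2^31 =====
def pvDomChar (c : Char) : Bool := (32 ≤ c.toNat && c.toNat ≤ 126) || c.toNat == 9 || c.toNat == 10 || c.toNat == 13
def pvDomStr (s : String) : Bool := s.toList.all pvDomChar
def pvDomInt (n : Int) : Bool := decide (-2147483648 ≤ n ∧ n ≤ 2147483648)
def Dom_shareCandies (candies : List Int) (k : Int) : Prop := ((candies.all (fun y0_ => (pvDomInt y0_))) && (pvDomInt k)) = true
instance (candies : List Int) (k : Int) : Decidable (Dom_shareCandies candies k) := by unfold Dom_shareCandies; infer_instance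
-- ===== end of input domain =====

-- B replaces A's complement Counter (whose length is re-read each step) by a sliding window
-- Counter plus an integer 'enclosed' of candy types fully inside the window, answering
-- distinct_total - enclosed; objective: alternative decomposition, same O(n) cost.

-- ===== PORT A =====
-- the body of A's for-loop (cnt[candies[i-k]] += 1; cnt[candies[i]] -= 1; pop if 0; ans = max(ans, len(cnt)))
def stepA (candies : List Int) (k : Int) (st : PySem.Dict Int Int × Int) (i : Int) :
    PySem.Dict Int Int × Int :=
  let cnt := st.1.modify (PySem.List.pyGetD candies (i - k) 0) 0 (· + 1)
  let cnt := cnt.modify (PySem.List.pyGetD candies i 0) 0 (· - 1)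
  let cnt := if cnt.getD (PySem.List.pyGetD candies i 0) 0 == 0
             then cnt.erase (PySem.List.pyGetD candies i 0) else cnt
  (cnt, max st.2 (cnt.size : Int))

def shareCandies (candies : List Int) (k : Int) : Int :=
  let ans : Int := 0
  let cnt := PySem.Dict.counter (PySem.List.slice candies (some k) none)
  let ans : Int := max ans (cnt.size : Int)
  ((PySem.List.pyRange k (candies.length : Int) 1).foldl (stepA candies k) (cnt, ans)).2

-- ===== PORT B =====
-- the body of B's for-loop (state = (window, enclosed, ans))
def stepB (candies : List Int) (k : Int) (total : PySem.Dict Int Int) (distinct : Int)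
    (st : PySem.Dict Int Int × Int × Int) (i : Int) :
    PySem.Dict Int Int × Int × Int :=
  let o := PySem.List.pyGetD candies (i - k) 0
  let enclosed := if st.1.getD o 0 == total.getD o 0 then st.2.1 - 1 else st.2.1
  let window := st.1.modify o 0 (· - 1)
  let c := PySem.List.pyGetD candies i 0
  let window := window.modify c 0 (· + 1)
  let enclosed := if window.getD c 0 == total.getD c 0 then enclosed + 1 else enclosed
  (window, enclosed, max st.2.2 (distinct - enclosed))

def shareCandies_alt (candies : List Int) (k : Int) : Int :=
  let total := PySem.Dict.counter candies
  let distinct : Int := (total.size : Int)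
  let window := PySem.Dict.counter (PySem.List.slice candies none (some k))
  let enclosed : Int :=
    ((window.items.filter (fun p => p.2 == total.getD p.1 0)).length : Int)
  let ans : Int := distinct - enclosed
  ((PySem.List.pyRange k (candies.length : Int) 1).foldl
      (stepB candies k total distinct) (window, enclosed, ans)).2.2

-- ===== PRECONDITION & SPEC =====
-- Pre_ excludes exactly negative k, on which Python A raises IndexError (candies[i - k] runs past the end).
def Pre_shareCandies (candies : List Int) (k : Int) : Prop := 0 ≤ k
instance (candies : List Int) (k : Int) : Decidable (Pre_shareCandies candies k) := by unfold Pre_shareCandies; infer_instance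
def pvWitness_shareCandies : List Int × Int := ([1, 2, 2, 3, 1], 2)

def Spec_shareCandies (candies : List Int) (k : Int) (out : Int) : Prop := out = shareCandies_alt candies k
instance (candies : List Int) (k : Int) (out : Int) : Decidable (Spec_shareCandies candies k out) := by unfold Spec_shareCandies; infer_instance

-- ===== CLAIM (what is proved, stated in full; the proofs are below) =====
def Claim_equal_shareCandies : Prop := ∀ (candies : List Int) (k : Int), Dom_shareCandies candies k → Pre_shareCandies candies k → Spec_shareCandies candies k (shareCandies candies k)

-- ===== LEMMAS AND PROOFS =====

-- the multiset of candies OUTSIDE the window ending (exclusively) at position j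
def comp (candies : List Int) (k j : Int) : List Int :=
  candies.take (j - k).toNat ++ candies.drop j.toNat

-- number of distinct values in a list
def dcount (l : List Int) : Int := ((PySem.Set.ofList l).length : Int)

-- the common abstract fold step: the candidate value after processing index i is dcount (comp (i+1))
def absStep (candies : List Int) (k : Int) (a i : Int) : Int :=
  max a (dcount (comp candies k (i + 1)))

-- ---- dcount lemmas ----
lemma dcount_nonneg (l : List Int) : 0 ≤ dcount l := by
  unfold dcount; positivity

lemma dcount_mem_congr (l l' : List Int) (h : ∀ x, x ∈ l ↔ x ∈ l') : dcount l = dcount l' := by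
  unfold dcount
  have hperm : (PySem.Set.ofList l).Perm (PySem.Set.ofList l') := by
    refine (List.perm_ext_iff_of_nodup (PySem.Set.nodup_ofList l) (PySem.Set.nodup_ofList l')).mpr ?_
    intro a
    simp only [PySem.Set.mem_ofList]
    exact h a
  exact_mod_cast hperm.length_eq

lemma discard_of_not_mem (s : PySem.Set Int) (x : Int) (hx : x ∉ s) :
    PySem.Set.discard s x = s := by
  unfold PySem.Set.discard
  apply List.filter_eq_self.mpr
  intro y hy
  simp only [Bool.not_eq_eq_eq_not, Bool.not_true, beq_eq_false_iff_ne, ne_eq]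
  rintro rfl
  exact hx hy

lemma dcount_cons (x : Int) (l : List Int) :
    dcount (x :: l) = if x ∈ l then dcount l else dcount l + 1 := by
  by_cases hx : x ∈ l
  · rw [if_pos hx]
    apply dcount_mem_congr
    intro y
    constructor
    · intro hy
      rcases List.mem_cons.mp hy with rfl | hy' <;> [exact hx; exact hy']
    · intro hy; exact List.mem_cons_of_mem _ hy
  · rw [if_neg hx]
    unfold dcount
    rw [PySem.Set.ofList_cons, discard_of_not_mem _ _ (by
      simp only [PySem.Set.mem_ofList]; exact hx)]
    simp only [List.length_cons]
    push_cast
    ring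

lemma dcount_append_cons (A B : List Int) (x : Int) :
    dcount (A ++ x :: B) = if x ∈ A ++ B then dcount (A ++ B) else dcount (A ++ B) + 1 := by
  rw [dcount_mem_congr (A ++ x :: B) (x :: (A ++ B)) (by
    intro y; simp only [List.mem_append, List.mem_cons]; tauto)]
  exact dcount_cons x (A ++ B)

lemma dcount_append_countP (T D : List Int) :
    dcount (T ++ D) = dcount D + (((PySem.Set.ofList T).filter (fun y => !(decide (y ∈ D)))).length : Int) := by
  rw [dcount_mem_congr (T ++ D) (D ++ T) (by
    intro y; simp only [List.mem_append]; tauto)]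
  unfold dcount
  rw [PySem.Set.ofList_append, PySem.Set.update_eq_append_filter]
  rw [List.length_append]
  push_cast
  congr 2
  apply congrArg
  apply List.filter_congr
  intro y _
  simp [PySem.Set.mem_ofList]

-- ---- Dict.erase lemmas (erase is items.filter) ----
lemma find?_filter_ne (l : List (Int × Int)) (x y : Int) :
    List.find? (fun p => p.1 == y) (l.filter (fun p => !(p.1 == x)))
      = if y = x then none else List.find? (fun p => p.1 == y) l := by
  induction l with
  | nil => simp
  | cons p rest ih =>
    by_cases hpx : p.1 = x
    · by_cases hxy : y = x
      · simp [List.filter_cons, hpx, ih, hxy]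
      · have hpy : (p.1 == y) = false := by
          simp only [beq_eq_false_iff_ne, ne_eq]
          intro h; exact hxy (h.symm.trans hpx)
        have hxy' : (x == y) = false := by
          simp only [beq_eq_false_iff_ne, ne_eq]
          exact fun h => hxy h.symm
        simp [List.filter_cons, hpx, ih, hxy, List.find?_cons, hpy, hxy']
    · by_cases hpy : p.1 = y
      · by_cases hxy : y = x
        · exact absurd (hpy.trans hxy) hpx
        · simp [List.filter_cons, hpx, List.find?_cons, hpy, hxy]
      · simp [List.filter_cons, hpx, List.find?_cons, hpy, ih]

lemma get?_erase (d : PySem.Dict Int Int) (x y : Int) :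
    (d.erase x).get? y = if y = x then none else d.get? y := by
  unfold PySem.Dict.erase PySem.Dict.get?
  simp only [find?_filter_ne]
  split <;> rfl

lemma getD_erase (d : PySem.Dict Int Int) (x y v : Int) :
    (d.erase x).getD y v = if y = x then v else d.getD y v := by
  unfold PySem.Dict.getD
  rw [get?_erase]
  split <;> rfl

lemma map_fst_filter (l : List (Int × Int)) (x : Int) :
    (l.filter (fun p => !(p.1 == x))).map Prod.fst
      = (l.map Prod.fst).filter (fun z => !(z == x)) := by
  induction l with
  | nil => rfl
  | cons p rest ih =>
    by_cases hpx : p.1 = x <;> simp [List.filter_cons, hpx, ih]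

lemma keys_erase (d : PySem.Dict Int Int) (x : Int) :
    (d.erase x).keys = d.keys.filter (fun z => !(z == x)) := by
  unfold PySem.Dict.erase PySem.Dict.keys
  simpa using map_fst_filter d.items x

lemma mem_keys_erase (d : PySem.Dict Int Int) (x y : Int) :
    y ∈ (d.erase x).keys ↔ y ∈ d.keys ∧ y ≠ x := by
  rw [keys_erase]
  simp [List.mem_filter]

lemma nodup_keys_erase (d : PySem.Dict Int Int) (x : Int) (h : d.keys.Nodup) :
    (d.erase x).keys.Nodup := by
  rw [keys_erase]
  exact h.filter _

lemma mem_keys_modify (d : PySem.Dict Int Int) (x d0 y : Int) (f : Int → Int) :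
    y ∈ (d.modify x d0 f).keys ↔ y = x ∨ y ∈ d.keys := by
  rw [PySem.Dict.keys_modify]
  exact PySem.Dict.mem_keys_insert d x y _

lemma nodup_keys_modify (d : PySem.Dict Int Int) (x d0 : Int) (f : Int → Int) (h : d.keys.Nodup) :
    (d.modify x d0 f).keys.Nodup := by
  rw [PySem.Dict.keys_modify]
  exact PySem.Dict.nodup_keys_insert d x _ h

-- ---- size from membership ----
lemma size_eq_dcount (d : PySem.Dict Int Int) (m : List Int)
    (hnd : d.keys.Nodup) (hmem : ∀ x, x ∈ d.keys ↔ x ∈ m) :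
    (d.size : Int) = dcount m := by
  have hperm : d.keys.Perm (PySem.Set.ofList m) := by
    refine (List.perm_ext_iff_of_nodup hnd (PySem.Set.nodup_ofList m)).mpr ?_
    intro a
    rw [PySem.Set.mem_ofList]
    exact hmem a
  have hlen : d.keys.length = (PySem.Set.ofList m).length := hperm.length_eq
  have hsz : d.size = d.keys.length := by
    unfold PySem.Dict.size PySem.Dict.keys
    simp
  unfold dcount
  rw [hsz, hlen]

-- ---- invariants ----
def InvA (candies : List Int) (k j : Int) (cnt : PySem.Dict Int Int) : Prop :=
  cnt.keys.Nodup ∧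
  (∀ x, cnt.getD x 0 = ((comp candies k j).count x : Int)) ∧
  (∀ x, x ∈ cnt.keys ↔ x ∈ comp candies k j)

def InvB (candies : List Int) (k j : Int) (window : PySem.Dict Int Int) (enclosed : Int) : Prop :=
  (∀ x, window.getD x 0 + ((comp candies k j).count x : Int) = (candies.count x : Int)) ∧
  enclosed = dcount candies - dcount (comp candies k j)

-- comp decompositions at an in-range step index
lemma comp_eq (candies : List Int) (k i : Int) (hk : 0 ≤ k) (h1 : k ≤ i)
    (h2 : i < (candies.length : Int)) :
    comp candies k i
      = candies.take (i - k).toNat ++ candies[i.toNat]'(by omega) :: candies.drop (i.toNat + 1) := by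
  unfold comp
  rw [List.drop_eq_getElem_cons (by omega)]

lemma comp_succ_eq (candies : List Int) (k i : Int) (hk : 0 ≤ k) (h1 : k ≤ i)
    (h2 : i < (candies.length : Int)) :
    comp candies k (i + 1)
      = candies.take (i - k).toNat ++ candies[(i - k).toNat]'(by omega) :: candies.drop (i.toNat + 1) := by
  unfold comp
  have h3 : (i + 1 - k).toNat = (i - k).toNat + 1 := by omega
  have h4 : (i + 1).toNat = i.toNat + 1 := by omega
  have h5 : List.take ((i - k).toNat + 1) candies
      = List.take ((i - k).toNat) candies ++ [candies[(i - k).toNat]'(by omega)] := by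
    rw [List.take_succ, List.getElem?_eq_getElem (by omega)]
    rfl
  rw [h3, h4, h5, List.append_assoc]
  rfl

lemma pyGetD_in (candies : List Int) (i : Int) (h0 : 0 ≤ i) (h2 : i < (candies.length : Int)) :
    PySem.List.pyGetD candies i 0 = candies[i.toNat]'(by omega) := by
  exact PySem.List.pyGetD_eq_getElem candies 0 h0 h2

-- ---- step lemmas ----
lemma dcount_delta (A B : List Int) (o c : Int) :
    dcount (A ++ o :: B) = dcount (A ++ c :: B) + (if o ∈ A ++ c :: B then 0 else 1)
                                               - (if c ∈ A ++ o :: B then 0 else 1) := by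
  rw [dcount_append_cons, dcount_append_cons]
  by_cases hoc : o = c
  · subst hoc; simp
  · have h1 : (o ∈ A ++ c :: B) ↔ o ∈ A ++ B := by
      simp only [List.mem_append, List.mem_cons]; tauto
    have h2 : (c ∈ A ++ o :: B) ↔ c ∈ A ++ B := by
      have : ¬ c = o := fun h => hoc h.symm
      simp only [List.mem_append, List.mem_cons]; tauto
    rw [if_congr h1 rfl rfl, if_congr h2 rfl rfl]
    by_cases ho : o ∈ A ++ B <;> by_cases hc : c ∈ A ++ B <;> simp [ho, hc] <;> omega

lemma stepA_inv (candies : List Int) (k i : Int) (hk : 0 ≤ k) (h1 : k ≤ i)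
    (h2 : i < (candies.length : Int)) (cnt : PySem.Dict Int Int) (a : Int)
    (h : InvA candies k i cnt) :
    InvA candies k (i + 1) (stepA candies k (cnt, a) i).1 ∧
    (stepA candies k (cnt, a) i).2 = absStep candies k a i := by
  obtain ⟨hnd, hcnt, hmemk⟩ := h
  have h0i : 0 ≤ i := le_trans hk h1
  have hikn : i.toNat < candies.length := by omega
  have hok : (i - k).toNat < candies.length := by omega
  have hgo := pyGetD_in candies (i - k) (by omega) (by omega)
  have hgc := pyGetD_in candies i h0i h2
  set o := candies[(i - k).toNat]'hok with hodef
  set c := candies[i.toNat]'hikn with hcdef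
  have hm : comp candies k i = candies.take (i - k).toNat ++ c :: candies.drop (i.toNat + 1) :=
    comp_eq candies k i hk h1 h2
  have hm' : comp candies k (i + 1) = candies.take (i - k).toNat ++ o :: candies.drop (i.toNat + 1) :=
    comp_succ_eq candies k i hk h1 h2
  have hcount : ∀ x : Int, (List.count x (comp candies k (i + 1)) : Int)
      = (List.count x (comp candies k i) : Int)
        + (if x = o then 1 else 0) - (if x = c then 1 else 0) := by
    intro x
    rw [hm, hm', List.count_append, List.count_append, List.count_cons, List.count_cons]
    by_cases hxo : x = o <;> by_cases hxc : x = c <;>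
      simp only [hxo, hxc, beq_self_eq_true, beq_iff_eq, if_true, if_false] <;>
      split_ifs <;> push_cast <;> omega
  have hoin' : o ∈ comp candies k (i + 1) := by
    rw [hm']; exact List.mem_append_right _ (List.mem_cons_self)
  have hcin : c ∈ comp candies k i := by
    rw [hm]; exact List.mem_append_right _ (List.mem_cons_self)
  have hmemM : ∀ x, x ≠ c → (x ∈ comp candies k (i + 1) ↔ x = o ∨ x ∈ comp candies k i) := by
    intro x hxc
    by_cases hxo : x = o
    · subst hxo; simp [hoin']
    · have h1' := hcount x
      rw [if_neg hxo, if_neg hxc] at h1'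
      constructor
      · intro hx
        have := List.count_pos_iff.mpr hx
        exact Or.inr (List.count_pos_iff.mp (by omega))
      · rintro (rfl | hx)
        · exact absurd rfl hxo
        · have := List.count_pos_iff.mpr hx
          exact List.count_pos_iff.mp (by omega)
  simp only [stepA, hgo, hgc]
  set cnt1 := cnt.modify o 0 (· + 1) with hc1
  set cnt2 := cnt1.modify c 0 (· - 1) with hc2
  have g1 : ∀ x, cnt1.getD x 0 = (List.count x (comp candies k i) : Int) + (if x = o then 1 else 0) := by
    intro x
    rw [hc1, PySem.Dict.getD_modify]
    split_ifs with hxo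
    · subst hxo; rw [hcnt]
    · rw [hcnt]; ring
  have g2 : ∀ x, cnt2.getD x 0 = (List.count x (comp candies k (i + 1)) : Int) := by
    intro x
    rw [hc2, PySem.Dict.getD_modify]
    have hx := hcount x
    split_ifs with hxc
    · subst hxc; rw [g1]; split_ifs at hx ⊢ <;> omega
    · rw [g1]; split_ifs at hx ⊢ <;> omega
  have nodup2 : cnt2.keys.Nodup := nodup_keys_modify _ _ _ _ (nodup_keys_modify _ _ _ _ hnd)
  have k2 : ∀ x, x ∈ cnt2.keys ↔ x = c ∨ x = o ∨ x ∈ comp candies k i := by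
    intro x
    rw [hc2, mem_keys_modify, hc1, mem_keys_modify]
    have := hmemk x
    tauto
  by_cases hz : cnt2.getD c 0 = 0
  · have hcz : (List.count c (comp candies k (i + 1)) : Int) = 0 := by rw [← g2 c]; exact hz
    have hcnot : c ∉ comp candies k (i + 1) := by
      intro hx
      have := List.count_pos_iff.mpr hx
      omega
    have hcond : (cnt2.getD c 0 == 0) = true := by rw [hz]; rfl
    rw [if_pos hcond]
    have hInv : InvA candies k (i + 1) (cnt2.erase c) := by
      refine ⟨nodup_keys_erase _ _ nodup2, ?_, ?_⟩
      · intro x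
        rw [getD_erase]
        split_ifs with hxc
        · subst hxc; omega
        · exact g2 x
      · intro x
        rw [mem_keys_erase]
        constructor
        · rintro ⟨hxk, hxc⟩
          rcases (k2 x).mp hxk with rfl | hrest
          · exact absurd rfl hxc
          · exact (hmemM x hxc).mpr hrest
        · intro hx
          have hxc : x ≠ c := fun hh => hcnot (hh ▸ hx)
          exact ⟨(k2 x).mpr (Or.inr ((hmemM x hxc).mp hx)), hxc⟩
    refine ⟨hInv, ?_⟩
    have := size_eq_dcount (cnt2.erase c) (comp candies k (i + 1)) hInv.1 hInv.2.2
    rw [absStep, this]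
  · have hcond : (cnt2.getD c 0 == 0) = false := by
      simp only [beq_eq_false_iff_ne, ne_eq]; exact hz
    rw [if_neg (by rw [hcond]; exact Bool.false_ne_true)]
    have hcpos : c ∈ comp candies k (i + 1) := by
      have := g2 c
      have hge : 0 ≤ (List.count c (comp candies k (i + 1)) : Int) := by positivity
      exact List.count_pos_iff.mp (by omega)
    have hInv : InvA candies k (i + 1) cnt2 := by
      refine ⟨nodup2, g2, ?_⟩
      intro x
      rw [k2]
      constructor
      · rintro (rfl | hrest)
        · exact hcpos
        · by_cases hxc : x = c
          · subst hxc; exact hcpos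
          · exact (hmemM x hxc).mpr hrest
      · intro hx
        by_cases hxc : x = c
        · exact Or.inl hxc
        · exact Or.inr ((hmemM x hxc).mp hx)
    refine ⟨hInv, ?_⟩
    have := size_eq_dcount cnt2 (comp candies k (i + 1)) hInv.1 hInv.2.2
    rw [absStep, this]

lemma stepB_inv (candies : List Int) (k i : Int) (hk : 0 ≤ k) (h1 : k ≤ i)
    (h2 : i < (candies.length : Int)) (window : PySem.Dict Int Int) (enclosed a : Int)
    (h : InvB candies k i window enclosed) :
    InvB candies k (i + 1) (stepB candies k (PySem.Dict.counter candies) (dcount candies) (window, enclosed, a) i).1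
        (stepB candies k (PySem.Dict.counter candies) (dcount candies) (window, enclosed, a) i).2.1 ∧
    (stepB candies k (PySem.Dict.counter candies) (dcount candies) (window, enclosed, a) i).2.2
      = absStep candies k a i := by
  obtain ⟨hw, he⟩ := h
  have h0i : 0 ≤ i := le_trans hk h1
  have hikn : i.toNat < candies.length := by omega
  have hok : (i - k).toNat < candies.length := by omega
  have hgo := pyGetD_in candies (i - k) (by omega) (by omega)
  have hgc := pyGetD_in candies i h0i h2
  set o := candies[(i - k).toNat]'hok with hodef
  set c := candies[i.toNat]'hikn with hcdef
  have hm : comp candies k i = candies.take (i - k).toNat ++ c :: candies.drop (i.toNat + 1) :=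
    comp_eq candies k i hk h1 h2
  have hm' : comp candies k (i + 1) = candies.take (i - k).toNat ++ o :: candies.drop (i.toNat + 1) :=
    comp_succ_eq candies k i hk h1 h2
  have hcount : ∀ x : Int, (List.count x (comp candies k (i + 1)) : Int)
      = (List.count x (comp candies k i) : Int)
        + (if x = o then 1 else 0) - (if x = c then 1 else 0) := by
    intro x
    rw [hm, hm', List.count_append, List.count_append, List.count_cons, List.count_cons]
    by_cases hxo : x = o <;> by_cases hxc : x = c <;>
      simp only [hxo, hxc, beq_self_eq_true, beq_iff_eq, if_true, if_false] <;>
      split_ifs <;> push_cast <;> omega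
  have hdelta : dcount (comp candies k (i + 1))
      = dcount (comp candies k i) + (if o ∈ comp candies k i then 0 else 1)
        - (if c ∈ comp candies k (i + 1) then 0 else 1) := by
    rw [hm, hm']
    exact dcount_delta _ _ o c
  simp only [stepB, hgo, hgc]
  set w1 := window.modify o 0 (· - 1) with hw1
  set w2 := w1.modify c 0 (· + 1) with hw2
  have g1' : ∀ x, w1.getD x 0 = (List.count x candies : Int)
      - (List.count x (comp candies k i) : Int) - (if x = o then 1 else 0) := by
    intro x
    rw [hw1, PySem.Dict.getD_modify]
    have h1' := hw x
    have h2' := hw o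
    split_ifs with hxo
    · rw [hxo]; omega
    · omega
  have g2 : ∀ x, w2.getD x 0 = (List.count x candies : Int) - (List.count x (comp candies k (i + 1)) : Int) := by
    intro x
    rw [hw2, PySem.Dict.getD_modify]
    split_ifs with hxc
    · rw [hxc]
      have hxc' := hcount c
      have hco := g1' c
      split_ifs at hxc' hco <;> omega
    · have hx := hcount x
      rw [if_neg hxc] at hx
      have h1' := g1' x
      split_ifs at hx h1' <;> omega
  have hcond1 : (window.getD o 0 == (PySem.Dict.counter candies).getD o 0)
      = decide (o ∉ comp candies k i) := by
    rw [PySem.Dict.getD_counter]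
    have h' := hw o
    by_cases ho : o ∈ comp candies k i
    · have := List.count_pos_iff.mpr ho
      simp only [ho, not_true_eq_false, decide_false]
      rw [beq_eq_false_iff_ne]
      intro hEq
      omega
    · have : List.count o (comp candies k i) = 0 := List.count_eq_zero.mpr ho
      simp only [ho, not_false_eq_true, decide_true, beq_iff_eq]
      omega
  have hcond2 : (w2.getD c 0 == (PySem.Dict.counter candies).getD c 0)
      = decide (c ∉ comp candies k (i + 1)) := by
    rw [PySem.Dict.getD_counter, g2]
    by_cases hc : c ∈ comp candies k (i + 1)
    · have := List.count_pos_iff.mpr hc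
      simp only [hc, not_true_eq_false, decide_false]
      rw [beq_eq_false_iff_ne]
      intro hEq
      omega
    · have : List.count c (comp candies k (i + 1)) = 0 := List.count_eq_zero.mpr hc
      simp only [hc, not_false_eq_true, decide_true, beq_iff_eq]
      omega
  have hw' : ∀ x, w2.getD x 0 + (List.count x (comp candies k (i + 1)) : Int) = (List.count x candies : Int) := by
    intro x
    rw [g2]
    ring
  have henc : (if (w2.getD c 0 == (PySem.Dict.counter candies).getD c 0) = true
        then (if (window.getD o 0 == (PySem.Dict.counter candies).getD o 0) = true
              then enclosed - 1 else enclosed) + 1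
        else (if (window.getD o 0 == (PySem.Dict.counter candies).getD o 0) = true
              then enclosed - 1 else enclosed))
      = dcount candies - dcount (comp candies k (i + 1)) := by
    rw [hcond1, hcond2]
    by_cases ho : o ∈ comp candies k i <;> by_cases hc : c ∈ comp candies k (i + 1) <;>
      simp [ho, hc] at hdelta ⊢ <;> omega
  exact ⟨⟨hw', by exact henc⟩, by rw [absStep, henc]; ring_nf⟩

-- ---- fold lemmas ----
lemma foldA (candies : List Int) (k : Int) (hk : 0 ≤ k) (m : Nat) :
    ∀ (j : Int), k ≤ j → ((candies.length : Int) - j).toNat = m →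
    ∀ (cnt : PySem.Dict Int Int) (a : Int), InvA candies k j cnt →
    ((PySem.List.pyRange j (candies.length : Int) 1).foldl (stepA candies k) (cnt, a)).2
      = (PySem.List.pyRange j (candies.length : Int) 1).foldl (absStep candies k) a := by
  induction m with
  | zero =>
    intro j hj hmeq cnt a hInv
    rw [PySem.List.pyRange_one_eq_nil (by omega)]
    rfl
  | succ m ih =>
    intro j hj hmeq cnt a hInv
    have hjn : j < (candies.length : Int) := by omega
    rw [PySem.List.pyRange_one_cons hjn]
    simp only [List.foldl_cons]
    obtain ⟨hInv', hval⟩ := stepA_inv candies k j hk hj hjn cnt a hInv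
    have hrw : stepA candies k (cnt, a) j = ((stepA candies k (cnt, a) j).1, absStep candies k a j) := by
      rw [← hval]
    rw [hrw]
    exact ih (j + 1) (by omega) (by omega) _ _ hInv'

lemma foldB (candies : List Int) (k : Int) (hk : 0 ≤ k) (m : Nat) :
    ∀ (j : Int), k ≤ j → ((candies.length : Int) - j).toNat = m →
    ∀ (window : PySem.Dict Int Int) (enclosed a : Int), InvB candies k j window enclosed →
    ((PySem.List.pyRange j (candies.length : Int) 1).foldl
        (stepB candies k (PySem.Dict.counter candies) (dcount candies)) (window, enclosed, a)).2.2
      = (PySem.List.pyRange j (candies.length : Int) 1).foldl (absStep candies k) a := by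
  induction m with
  | zero =>
    intro j hj hmeq window enclosed a hInv
    rw [PySem.List.pyRange_one_eq_nil (by omega)]
    rfl
  | succ m ih =>
    intro j hj hmeq window enclosed a hInv
    have hjn : j < (candies.length : Int) := by omega
    rw [PySem.List.pyRange_one_cons hjn]
    simp only [List.foldl_cons]
    obtain ⟨hInv', hval⟩ := stepB_inv candies k j hk hj hjn window enclosed a hInv
    have hrw : stepB candies k (PySem.Dict.counter candies) (dcount candies) (window, enclosed, a) j
        = ((stepB candies k (PySem.Dict.counter candies) (dcount candies) (window, enclosed, a) j).1,
           (stepB candies k (PySem.Dict.counter candies) (dcount candies) (window, enclosed, a) j).2.1,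
           absStep candies k a j) := by
      rw [← hval]
    rw [hrw]
    exact ih (j + 1) (by omega) (by omega) _ _ _ hInv'

-- ---- initial states ----
lemma comp_at_k (candies : List Int) (k : Int) : comp candies k k = candies.drop k.toNat := by
  simp [comp]

lemma size_counter (xs : List Int) : ((PySem.Dict.counter xs).size : Int) = dcount xs := by
  unfold PySem.Dict.size dcount
  rw [PySem.Dict.items_counter]
  simp

lemma initA (candies : List Int) (k : Int) (hk : 0 ≤ k) :
    InvA candies k k (PySem.Dict.counter (PySem.List.slice candies (some k) none)) := by
  rw [PySem.List.slice_from _ hk]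
  refine ⟨?_, ?_, ?_⟩
  · rw [PySem.Dict.keys_counter]
    exact PySem.Set.nodup_ofList _
  · intro x
    rw [PySem.Dict.getD_counter, comp_at_k]
  · intro x
    rw [PySem.Dict.keys_counter, PySem.Set.mem_ofList, comp_at_k]

lemma initB (candies : List Int) (k : Int) (hk : 0 ≤ k) :
    InvB candies k k (PySem.Dict.counter (PySem.List.slice candies none (some k)))
      (((PySem.Dict.counter (PySem.List.slice candies none (some k))).items.filter
          (fun p => p.2 == (PySem.Dict.counter candies).getD p.1 0)).length : Int) := by
  rw [PySem.List.slice_to _ hk]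
  have hsplit : candies.take k.toNat ++ candies.drop k.toNat = candies := List.take_append_drop _ _
  constructor
  · intro x
    rw [PySem.Dict.getD_counter, comp_at_k]
    have := List.count_append (a := x) (l₁ := candies.take k.toNat) (l₂ := candies.drop k.toNat)
    rw [hsplit] at this
    push_cast
    omega
  · rw [comp_at_k, PySem.Dict.items_counter, List.filter_map, List.length_map]
    have hfc : ∀ y ∈ PySem.Set.ofList (candies.take k.toNat),
        (((fun p => p.2 == (PySem.Dict.counter candies).getD p.1 0) ∘
          (fun x => (x, (List.count x (candies.take k.toNat) : Int)))) y)
          = !(decide (y ∈ candies.drop k.toNat)) := by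
      intro y _
      simp only [Function.comp, PySem.Dict.getD_counter]
      have hcnt := List.count_append (a := y) (l₁ := candies.take k.toNat) (l₂ := candies.drop k.toNat)
      rw [hsplit] at hcnt
      by_cases hy : y ∈ candies.drop k.toNat
      · have hpos : 0 < List.count y (candies.drop k.toNat) := List.count_pos_iff.mpr hy
        simp only [hy, decide_true, Bool.not_true]
        rw [beq_eq_false_iff_ne]
        intro hEq
        have : List.count y (candies.take k.toNat) = List.count y candies := by exact_mod_cast hEq
        omega
      · have h0 : List.count y (candies.drop k.toNat) = 0 := List.count_eq_zero.mpr hy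
        simp only [hy, decide_false, Bool.not_false, beq_iff_eq]
        exact_mod_cast (by omega : List.count y (candies.take k.toNat) = List.count y candies)
    rw [List.filter_congr hfc]
    have := dcount_append_countP (candies.take k.toNat) (candies.drop k.toNat)
    rw [hsplit] at this
    omega

-- ===== VERDICT (by name: the statement is the Claim_ definition above) =====
theorem shareCandies_spec : Claim_equal_shareCandies := by
  intro candies k _ hk
  unfold Spec_shareCandies shareCandies shareCandies_alt
  simp only []
  have hA := foldA candies k hk ((candies.length : Int) - k).toNat k le_rfl rfl
    (PySem.Dict.counter (PySem.List.slice candies (some k) none))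
    (max 0 ((PySem.Dict.counter (PySem.List.slice candies (some k) none)).size : Int))
    (initA candies k hk)
  have hB := foldB candies k hk ((candies.length : Int) - k).toNat k le_rfl rfl
    (PySem.Dict.counter (PySem.List.slice candies none (some k)))
    (((PySem.Dict.counter (PySem.List.slice candies none (some k))).items.filter
        (fun p => p.2 == (PySem.Dict.counter candies).getD p.1 0)).length : Int)
    ((((PySem.Dict.counter candies).size : Int)) -
      (((PySem.Dict.counter (PySem.List.slice candies none (some k))).items.filter
        (fun p => p.2 == (PySem.Dict.counter candies).getD p.1 0)).length : Int))
    (initB candies k hk)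
  rw [size_counter candies] at hB
  rw [size_counter candies]
  rw [hA, hB]
  -- both abstract folds start from the same initial accumulator
  have h0A : max 0 ((PySem.Dict.counter (PySem.List.slice candies (some k) none)).size : Int)
      = dcount (comp candies k k) := by
    rw [size_counter, PySem.List.slice_from _ hk, comp_at_k]
    exact max_eq_right (dcount_nonneg _)
  have h0B : dcount candies -
      (((PySem.Dict.counter (PySem.List.slice candies none (some k))).items.filter
        (fun p => p.2 == (PySem.Dict.counter candies).getD p.1 0)).length : Int)
      = dcount (comp candies k k) := by
    have := (initB candies k hk).2
    omega
  rw [h0A, h0B]
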